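-- pv_equiv track=rewrite | github.com/arsho/Hackerrank_Security_Domain_Solutions | Cryptography/BasicCryptanalysis.py | get_word_pattern
-- ===== SOURCE A (Python) =====
-- def get_word_pattern(word):
--     number_of_letter = 0
--     letter_dict = {}
--     word_pattern = []
--     for letter in word:
--         if letter not in letter_dict:
--             letter_dict[letter] = str(number_of_letter)
--             number_of_letter += 1
--         word_pattern.append(letter_dict[letter])
--     word_pattern_str = '.'.join(word_pattern)
--     return word_pattern_str
-- ===== SOURCE B (Python) =====
-- def get_word_pattern(word):
--     # A letter's pattern number is the count of distinct letters strictly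
--     # before its first occurrence: no dict and no counter are maintained.
--     return '.'.join(str(len(set(word[:word.index(c)]))) for c in word)
-- ===== Notes on version B (the rewrite author's own statement) =====
-- stated objective: simpler
-- what changed: Drops A's incrementally built letter->number dict and counter entirely: each letter's number is recomputed directly as the count of distinct letters before its first occurrence (len(set(word[:word.index(c)]))), making B a stateless one-liner at quadratic cost.
import Mathlib
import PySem

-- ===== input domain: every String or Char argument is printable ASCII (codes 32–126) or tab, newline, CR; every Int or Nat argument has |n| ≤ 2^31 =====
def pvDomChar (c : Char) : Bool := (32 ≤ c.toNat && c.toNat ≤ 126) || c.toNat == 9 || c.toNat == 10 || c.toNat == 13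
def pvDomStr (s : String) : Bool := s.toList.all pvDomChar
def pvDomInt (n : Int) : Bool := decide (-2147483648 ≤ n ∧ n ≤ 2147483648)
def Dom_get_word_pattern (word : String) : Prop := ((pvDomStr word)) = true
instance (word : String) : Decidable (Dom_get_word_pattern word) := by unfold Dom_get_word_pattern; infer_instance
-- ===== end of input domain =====

-- B drops A's dict and counter: each letter's number is recomputed as the count of
-- distinct letters before its first occurrence; same value, B pays quadratic cost.

-- ===== PORT A =====
-- A's loop: if the letter is unseen, record str(counter) for it and bump the counter; then
-- append letter_dict[letter]. The lookup is always on a present key, so getD '' is exact here.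
def get_word_pattern (word : String) : String :=
  let st := word.toList.foldl
    (fun (st : Int × PySem.Dict Char String × List String) letter =>
      let (number_of_letter, letter_dict, word_pattern) := st
      if letter_dict.contains letter = false then
        let letter_dict2 := letter_dict.insert letter (PySem.Int.toStr number_of_letter)
        (number_of_letter + 1, letter_dict2, word_pattern ++ [letter_dict2.getD letter ""])
      else
        (number_of_letter, letter_dict, word_pattern ++ [letter_dict.getD letter ""]))
    (0, PySem.Dict.empty, [])
  PySem.Str.join "." st.2.2

-- ===== PORT B =====
-- word.index(c) is ported as index? on the character list (c comes from word, so it is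
-- always some and Python never raises); word[:i] is the slice primitive; set(...) is Set.ofList.
def get_word_pattern_alt (word : String) : String :=
  PySem.Str.join "." (word.toList.map (fun c =>
    PySem.Int.toStr
      (((PySem.Set.ofList
          (PySem.List.slice word.toList none
            (some (((PySem.List.index? word.toList c).getD 0 : Nat) : Int)))).length : Int))))

-- ===== PRECONDITION & SPEC =====
def Spec_get_word_pattern (word : String) (out : String) : Prop := out = get_word_pattern_alt word
instance (word : String) (out : String) : Decidable (Spec_get_word_pattern word out) := by unfold Spec_get_word_pattern; infer_instance

-- ===== CLAIM (what is proved, stated in full; the proofs are below) =====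
def Claim_equal_get_word_pattern : Prop := ∀ (word : String), Dom_get_word_pattern word → Spec_get_word_pattern word (get_word_pattern word)

-- ===== LEMMAS AND PROOFS =====

-- the table A builds, over an arbitrary character list (proof-side characterisation of A)
def pvTable (l : List Char) : PySem.Dict Char String :=
  (PySem.List.enumerate (PySem.List.dedup l)).foldl
    (fun (d : PySem.Dict Char String) p => d.insert p.2 (PySem.Int.toStr p.1)) PySem.Dict.empty

-- the common value of each pattern entry
def pvEntry (l : List Char) (c : Char) : String :=
  PySem.Int.toStr (((PySem.List.index? (PySem.List.dedup l) c).getD 0 : Nat) : Int)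

lemma pvDedup_append (l : List Char) (c : Char) :
    PySem.List.dedup (l ++ [c]) =
      if c ∈ l then PySem.List.dedup l else PySem.List.dedup l ++ [c] := by
  rw [PySem.List.dedup_eq_ofList, PySem.List.dedup_eq_ofList,
    PySem.Set.ofList_append_singleton, PySem.Set.add_eq_ite]
  simp [PySem.Set.mem_ofList]

lemma pvTable_items (l : List Char) :
    (pvTable l).items =
      (PySem.List.enumerate (PySem.List.dedup l)).map (fun p => (p.2, PySem.Int.toStr p.1)) := by
  unfold pvTable
  rw [PySem.Dict.items_foldl_insert_fresh]
  · rfl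
  · intro a _; simp
  · rw [PySem.List.map_snd_enumerate]; exact PySem.List.nodup_dedup l

lemma pvTable_keys (l : List Char) : (pvTable l).keys = PySem.List.dedup l := by
  simp only [PySem.Dict.keys, pvTable_items, List.map_map]
  have h : ((fun p : Char × String => p.1) ∘ fun p : Int × Char => (p.2, PySem.Int.toStr p.1))
      = (fun p : Int × Char => p.2) := rfl
  rw [h, PySem.List.map_snd_enumerate]

lemma pvTable_getD (l : List Char) (c : Char) (hc : c ∈ l) :
    (pvTable l).getD c "" = pvEntry l c := by
  have hmem : c ∈ PySem.List.dedup l := (PySem.List.mem_dedup l c).2 hc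
  obtain ⟨k, hk⟩ := Option.isSome_iff_exists.1 ((PySem.List.index?_isSome_iff (PySem.List.dedup l) c).2 hmem)
  obtain ⟨hlt, hck, -⟩ := PySem.List.getElem_of_index?_eq_some hk
  have hp : ((k : Int), c) ∈ PySem.List.enumerate (PySem.List.dedup l) := by
    rw [PySem.List.mem_enumerate_iff]
    exact ⟨k, hlt, by simp [hck.symm]⟩
  have hin : (c, PySem.Int.toStr (k : Int)) ∈ (pvTable l).items := by
    rw [pvTable_items]
    exact List.mem_map.2 ⟨((k : Int), c), hp, rfl⟩
  have hnd : (pvTable l).keys.Nodup := by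
    rw [pvTable_keys]; exact PySem.List.nodup_dedup l
  rw [PySem.Dict.getD_of_mem_items _ hin hnd]
  unfold pvEntry
  rw [hk]
  rfl

-- A's whole fold state, characterised
lemma pvA_state (l : List Char) :
    l.foldl
      (fun (st : Int × PySem.Dict Char String × List String) letter =>
        let (number_of_letter, letter_dict, word_pattern) := st
        if letter_dict.contains letter = false then
          let letter_dict2 := letter_dict.insert letter (PySem.Int.toStr number_of_letter)
          (number_of_letter + 1, letter_dict2, word_pattern ++ [letter_dict2.getD letter ""])
        else
          (number_of_letter, letter_dict, word_pattern ++ [letter_dict.getD letter ""]))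
      (0, PySem.Dict.empty, [])
    = (((PySem.List.dedup l).length : Int), pvTable l, l.map (pvEntry l)) := by
  induction l using List.reverseRecOn with
  | nil => rfl
  | append_singleton l c ih =>
    rw [List.foldl_append, List.foldl_cons, List.foldl_nil, ih]
    by_cases hc : c ∈ l
    · have hded := pvDedup_append l c
      rw [if_pos hc] at hded
      have hcont : (pvTable l).contains c = true := by
        rw [PySem.Dict.contains_iff_mem_keys, pvTable_keys]
        exact (PySem.List.mem_dedup l c).2 hc
      have hT : pvTable (l ++ [c]) = pvTable l := by unfold pvTable; rw [hded]
      have hE : pvEntry (l ++ [c]) = pvEntry l := by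
        funext x; unfold pvEntry; rw [hded]
      simp only [hcont, Bool.true_eq_false, if_false, hded, hT, hE, List.map_append,
        List.map_cons, List.map_nil, pvTable_getD l c hc]
    · have hnotmem : c ∉ PySem.List.dedup l := fun h => hc ((PySem.List.mem_dedup l c).1 h)
      have hded := pvDedup_append l c
      rw [if_neg hc] at hded
      have hcont : (pvTable l).contains c = false := by
        have hiff := PySem.Dict.contains_iff_mem_keys (d := pvTable l) (k := c)
        rw [pvTable_keys] at hiff
        cases h : (pvTable l).contains c with
        | false => rfl
        | true => exact absurd (hiff.1 h) hnotmem
      have hT : pvTable (l ++ [c]) =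
          (pvTable l).insert c (PySem.Int.toStr ((PySem.List.dedup l).length : Int)) := by
        unfold pvTable
        rw [hded, PySem.List.enumerate_append, List.foldl_append,
          PySem.List.enumerate_cons, PySem.List.enumerate_nil]
        simp
      have hfin : pvEntry (l ++ [c]) c =
          PySem.Int.toStr ((PySem.List.dedup l).length : Int) := by
        unfold pvEntry
        rw [hded, PySem.List.index?_append_singleton_self _ _ hnotmem]
        rfl
      have hmapl : l.map (pvEntry (l ++ [c])) = l.map (pvEntry l) := by
        apply List.map_congr_left
        intro x hx
        unfold pvEntry
        rw [hded, PySem.List.index?_append_of_mem [c] ((PySem.List.mem_dedup l x).2 hx)]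
      simp only [hcont, if_true, hded, hT, List.map_append, List.map_cons, List.map_nil,
        hmapl, hfin, PySem.Dict.getD_insert_self, List.length_append, List.length_cons,
        List.length_nil, Prod.mk.injEq]
      trivial

-- folding Set.add only ever appends: the start list stays a prefix
lemma pvFoldl_add_prefix (r : List Char) (s : List Char) :
    ∃ t, r.foldl PySem.Set.add s = s ++ t := by
  induction r generalizing s with
  | nil => exact ⟨[], by simp⟩
  | cons a r ih =>
    rw [List.foldl_cons, PySem.Set.add_eq_ite]
    split_ifs with h
    · exact ih s
    · obtain ⟨t, ht⟩ := ih (s ++ [a])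
      exact ⟨[a] ++ t, by rw [ht, List.append_assoc]⟩

-- the bridge: A's entry (index in the ordered dedup) is B's entry (distinct count before
-- the first occurrence)
lemma pvEntry_eq_alt (l : List Char) (c : Char) (hc : c ∈ l) :
    pvEntry l c =
      PySem.Int.toStr
        (((PySem.Set.ofList (l.take ((PySem.List.index? l c).getD 0))).length : Int)) := by
  obtain ⟨k, hk⟩ := Option.isSome_iff_exists.1 ((PySem.List.index?_isSome_iff l c).2 hc)
  obtain ⟨pre, suf, hl, hlen, hnot⟩ := (PySem.List.index?_eq_some_iff l c k).1 hk
  have htake : l.take ((PySem.List.index? l c).getD 0) = pre := by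
    rw [hk, Option.getD_some, hl, ← hlen, List.take_left]
  have hcnotin : c ∉ PySem.Set.ofList pre := fun h => hnot ((PySem.Set.mem_ofList pre c).1 h)
  have hded : PySem.List.dedup l
      = (PySem.Set.ofList pre ++ [c]) ++ (suf.foldl PySem.Set.add (PySem.Set.ofList pre ++ [c])).drop (PySem.Set.ofList pre ++ [c]).length := by
    obtain ⟨t, ht⟩ := pvFoldl_add_prefix suf (PySem.Set.ofList pre ++ [c])
    rw [PySem.List.dedup_eq_ofList, hl, PySem.Set.ofList_eq_foldl, List.foldl_append,
      List.foldl_cons, ← PySem.Set.ofList_eq_foldl]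
    have hadd : PySem.Set.add (PySem.Set.ofList pre) c = PySem.Set.ofList pre ++ [c] := by
      rw [PySem.Set.add_eq_ite, if_neg hcnotin]
    rw [hadd, ht]
    simp
  have hidx : PySem.List.index? (PySem.List.dedup l) c = some (PySem.Set.ofList pre).length := by
    rw [hded, PySem.List.index?_append_of_mem _ (by simp : c ∈ PySem.Set.ofList pre ++ [c]),
      PySem.List.index?_append_singleton_self _ _ hcnotin]
  unfold pvEntry
  rw [hidx, htake, Option.getD_some]

-- ===== VERDICT (by name: the statement is the Claim_ definition above) =====
theorem get_word_pattern_spec : Claim_equal_get_word_pattern := by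
  intro word _
  show get_word_pattern word = get_word_pattern_alt word
  unfold get_word_pattern get_word_pattern_alt
  rw [pvA_state word.toList]
  show PySem.Str.join "." (word.toList.map (pvEntry word.toList)) = _
  congr 1
  apply List.map_congr_left
  intro c hc
  rw [PySem.List.slice_to_natCast, pvEntry_eq_alt word.toList c hc]
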